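-- pv_equiv track=rewrite | github.com/WadeOpulentity/iphone-cli | iphone_cli/companion/discovery.py | _pick_best_address
-- ===== SOURCE A (Python) =====
-- def _pick_best_address(addresses: list[str]) -> str:
--     """Pick the best connectable address from a list."""
--     for addr in addresses:
--         if addr.startswith("169.254."):
--             return addr
--     for addr in addresses:
--         if "." in addr and not addr.startswith("127."):
--             return addr
--     return addresses[0]
-- ===== SOURCE B (Python) =====
-- def _pick_best_address(addresses: list[str]) -> str:
--     """Pick the best connectable address from a list (single pass)."""
--     first_linklocal = None
--     first_valid = None
--     for addr in addresses:
--         if first_linklocal is None and addr.startswith("169.254."):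
--             first_linklocal = addr
--         if first_valid is None and "." in addr and not addr.startswith("127."):
--             first_valid = addr
--     if first_linklocal is not None:
--         return first_linklocal
--     if first_valid is not None:
--         return first_valid
--     return addresses[0]
-- ===== Notes on version B (the rewrite author's own statement) =====
-- stated objective: alternative
-- what changed: Replaces A's two sequential early-return scans with a single fold that records the first link-local and the first valid address, deciding the priority after the loop.
import Mathlib
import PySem

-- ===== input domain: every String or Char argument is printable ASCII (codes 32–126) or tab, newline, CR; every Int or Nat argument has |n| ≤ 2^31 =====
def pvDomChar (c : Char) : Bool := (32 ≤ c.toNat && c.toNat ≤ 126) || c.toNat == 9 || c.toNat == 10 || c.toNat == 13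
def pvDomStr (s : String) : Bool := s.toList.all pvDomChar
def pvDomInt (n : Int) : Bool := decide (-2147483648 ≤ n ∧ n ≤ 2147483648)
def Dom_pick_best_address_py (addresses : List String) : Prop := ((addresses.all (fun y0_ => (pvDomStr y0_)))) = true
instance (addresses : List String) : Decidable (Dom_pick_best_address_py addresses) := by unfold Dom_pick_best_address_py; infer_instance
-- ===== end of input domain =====

-- B is a single pass keeping the first link-local and the first valid address; A is two early-return scans. Alternative decomposition, same cost.

-- ===== PORT A =====
-- A's first loop: return the first addr starting with "169.254."; second loop: first addr with "." and not "127."-prefixed; else addresses[0].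
def pick_best_address_py (addresses : List String) : String :=
  match addresses.find? (fun addr => PySem.Str.startswith addr "169.254.") with
  | some a => a
  | none =>
    match addresses.find? (fun addr => PySem.Str.isIn "." addr && !PySem.Str.startswith addr "127.") with
    | some a => a
    | none => (PySem.List.pyGet? addresses 0).getD ""  -- Pre_ excludes []; pyGet? is exact otherwise

-- ===== PORT B =====
-- loop body of Source B: set each slot only the first time its predicate matches
def pbaStep (st : Option String × Option String) (addr : String) : Option String × Option String :=
  ((if st.1.isNone && PySem.Str.startswith addr "169.254." then some addr else st.1),
   (if st.2.isNone && (PySem.Str.isIn "." addr && !PySem.Str.startswith addr "127.") then some addr else st.2))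

def pick_best_address_py_alt (addresses : List String) : String :=
  let st := addresses.foldl pbaStep (none, none)
  match st.1 with
  | some a => a
  | none =>
    match st.2 with
    | some a => a
    | none => (PySem.List.pyGet? addresses 0).getD ""  -- Pre_ excludes []

-- ===== PRECONDITION & SPEC =====
-- Pre_ excludes the empty list, on which both Pythons raise IndexError at addresses[0].
def Pre_pick_best_address_py (addresses : List String) : Prop := addresses ≠ []
instance (addresses : List String) : Decidable (Pre_pick_best_address_py addresses) := by unfold Pre_pick_best_address_py; infer_instance
def pvWitness_pick_best_address_py : List String := ["127.0.0.1", "10.0.0.5"]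

def Spec_pick_best_address_py (addresses : List String) (out : String) : Prop := out = pick_best_address_py_alt addresses
instance (addresses : List String) (out : String) : Decidable (Spec_pick_best_address_py addresses out) := by unfold Spec_pick_best_address_py; infer_instance

-- ===== CLAIM (what is proved, stated in full; the proofs are below) =====
def Claim_equal_pick_best_address_py : Prop := ∀ (addresses : List String), Dom_pick_best_address_py addresses → Pre_pick_best_address_py addresses → Spec_pick_best_address_py addresses (pick_best_address_py addresses)

-- ===== LEMMAS AND PROOFS =====
-- The fold's two slots are exactly the first matches of the two predicates.
theorem pbaStep_foldl (xs : List String) (s : Option String × Option String) :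
    xs.foldl pbaStep s =
      (s.1.or (xs.find? (fun addr => PySem.Str.startswith addr "169.254.")),
       s.2.or (xs.find? (fun addr => PySem.Str.isIn "." addr && !PySem.Str.startswith addr "127."))) := by
  induction xs generalizing s with
  | nil => simp
  | cons x xs ih =>
    rw [List.foldl_cons, ih, List.find?_cons, List.find?_cons]
    obtain ⟨s1, s2⟩ := s
    cases s1 <;> cases s2 <;>
      simp only [pbaStep, Option.isNone_none, Option.isNone_some, Bool.true_and,
        Bool.false_and] <;>
      split_ifs <;> simp_all <;> (try split <;> simp_all)

-- ===== VERDICT (by name: the statement is the Claim_ definition above) =====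
theorem pick_best_address_py_spec : Claim_equal_pick_best_address_py := by
  intro addresses _ _
  show pick_best_address_py addresses = pick_best_address_py_alt addresses
  rw [pick_best_address_py_alt, pbaStep_foldl]
  simp only [Option.none_or]
  rfl
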